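-- pv_equiv track=rewrite | github.com/OKESTRO-AIDevOps/nkia | staging_downstream/repo-arg.py | line_classifier
-- ===== SOURCE A (Python) =====
-- def line_classifier(line):
--
--     cls = ''
--
--     hit = 0
--
--     for j in range(len(line)):
--
--         if j == 0 and (line[j] != ' ' and line[j] != '-'):
--
--             cls = 'REPO'
--             hit = 1
--             break
--
--         elif j != 0 and line[j] == ' ':
--
--             continue
--
--         elif j != 0 and line[j] == '-':
--
--             cls = 'ARG'
--             hit = 1
--             break
--
--         elif j != 0 and (line[j] != ' ' and line[j] != '-'):
--
--             cls = 'VAL'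
--             hit = 1
--             break
--
--     if hit == 0 :
--         cls = 'ILLEGAL'
--         return
--
--     return cls
-- ===== SOURCE B (Python) =====
-- def line_classifier(line):
--     # Table-driven DFA over two states; terminal states are the answers.
--     TABLE = {
--         'start': {' ': 'skip', '-': 'skip', 'other': 'REPO'},
--         'skip':  {' ': 'skip', '-': 'ARG', 'other': 'VAL'},
--     }
--     state = 'start'
--     for ch in line:
--         key = ch if ch in (' ', '-') else 'other'
--         state = TABLE[state][key]
--         if state in ('REPO', 'ARG', 'VAL'):
--             return state
--     return None
-- ===== Notes on version B (the rewrite author's own statement) =====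
-- stated objective: alternative
-- what changed: Replaces A's index-based loop with positional branch tests, a hit flag and a post-loop fixup by a table-driven two-state DFA that feeds each character's class through a transition table and returns as soon as a terminal state is reached.
import Mathlib
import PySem

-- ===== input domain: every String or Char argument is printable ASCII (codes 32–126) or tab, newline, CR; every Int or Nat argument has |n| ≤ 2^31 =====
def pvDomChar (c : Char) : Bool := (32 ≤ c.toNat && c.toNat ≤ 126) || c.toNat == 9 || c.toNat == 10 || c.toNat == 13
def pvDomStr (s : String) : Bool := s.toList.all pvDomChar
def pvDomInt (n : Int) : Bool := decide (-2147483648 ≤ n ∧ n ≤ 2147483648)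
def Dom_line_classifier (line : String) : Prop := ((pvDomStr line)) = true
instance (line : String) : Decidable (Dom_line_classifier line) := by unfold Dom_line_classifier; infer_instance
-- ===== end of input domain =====

-- B replaces A's index loop with positional tests, hit flag and post-loop fixup by a
-- table-driven two-state DFA; objective: alternative (same O(n) cost, different structure).

-- ===== PORT A =====
-- A's for-loop over j in range(len(line)) with break; returns (cls, hit).
def lcLoopA (cs : List Char) (j : Nat) : String × Nat :=
  if h : j < cs.length then
    let c := cs[j]
    if j = 0 ∧ c ≠ ' ' ∧ c ≠ '-' then ("REPO", 1)
    else if j ≠ 0 ∧ c = ' ' then lcLoopA cs (j+1)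
    else if j ≠ 0 ∧ c = '-' then ("ARG", 1)
    else if j ≠ 0 ∧ c ≠ ' ' ∧ c ≠ '-' then ("VAL", 1)
    else lcLoopA cs (j+1)   -- j = 0 with line[0] ∈ {' ', '-'}: no branch fires, loop continues
  else ("", 0)
termination_by cs.length - j

def line_classifier (line : String) : Option String :=
  let r := lcLoopA line.toList 0
  if r.2 = 0 then none else some r.1   -- hit == 0: 'return' (None); else return cls

-- ===== PORT B =====
-- The transition table TABLE[state][key] (nested dict of string literals).
def lcTableB (state key : String) : String :=
  if state = "start" then
    if key = " " then "skip" else if key = "-" then "skip" else "REPO"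
  else  -- state = "skip"
    if key = " " then "skip" else if key = "-" then "ARG" else "VAL"

-- B's for-loop over the characters, carrying the DFA state.
def lcRunB (state : String) (cs : List Char) : Option String :=
  match cs with
  | [] => none
  | c :: rest =>
    let key := if c = ' ' ∨ c = '-' then String.ofList [c] else "other"
    let st := lcTableB state key
    if st = "REPO" ∨ st = "ARG" ∨ st = "VAL" then some st else lcRunB st rest

def line_classifier_alt (line : String) : Option String := lcRunB "start" line.toList

-- ===== PRECONDITION & SPEC =====
def Spec_line_classifier (line : String) (out : Option String) : Prop := out = line_classifier_alt line
instance (line : String) (out : Option String) : Decidable (Spec_line_classifier line out) := by unfold Spec_line_classifier; infer_instance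

-- ===== CLAIM (what is proved, stated in full; the proofs are below) =====
def Claim_equal_line_classifier : Prop := ∀ (line : String), Dom_line_classifier line → Spec_line_classifier line (line_classifier line)

-- ===== LEMMAS AND PROOFS =====

theorem smk_space : String.ofList [' '] = " " := rfl
theorem smk_dash : String.ofList ['-'] = "-" := rfl

-- From j ≥ 1 on, A's loop computes exactly the first-nonspace classification of the suffix.
theorem lcLoopA_tail (cs : List Char) (j : Nat) (hj : 1 ≤ j) :
    lcLoopA cs j =
      match (cs.drop j).dropWhile (· = ' ') with
      | [] => ("", 0)
      | d :: _ => if d = '-' then ("ARG", 1) else ("VAL", 1) := by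
  by_cases h : j < cs.length
  · have hdrop : cs.drop j = cs[j] :: cs.drop (j+1) := List.drop_eq_getElem_cons h
    have hj0 : j ≠ 0 := by omega
    by_cases hsp : cs[j] = ' '
    · rw [lcLoopA]
      simp only [h, dif_pos, hj0, hsp]
      rw [lcLoopA_tail cs (j+1) (by omega)]
      simp [hdrop, hsp]
    · by_cases hda : cs[j] = '-'
      · rw [lcLoopA, dif_pos h]
        simp [hj0, hda, hdrop]
      · rw [lcLoopA, dif_pos h]
        simp only [hj0, hsp, hda, hdrop, List.dropWhile_cons]
        simp [hda]
        rw [if_pos (show ¬j = 0 ∧ ¬cs[j] = ' ' from ⟨hj0, hsp⟩), hdrop]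
        simp [hda]
  · have hnil : cs.drop j = [] := List.drop_eq_nil_of_le (by omega)
    rw [lcLoopA]
    simp [h, hnil]
termination_by cs.length - j

-- In state "skip", B's DFA run computes the same first-nonspace classification.
theorem lcRunB_skip (cs : List Char) :
    lcRunB "skip" cs =
      match cs.dropWhile (· = ' ') with
      | [] => none
      | d :: _ => if d = '-' then some "ARG" else some "VAL" := by
  induction cs with
  | nil => simp [lcRunB]
  | cons c rest ih =>
    by_cases hsp : c = ' '
    · simp [lcRunB, lcTableB, hsp, smk_space, ih]
    · by_cases hda : c = '-'
      · simp [lcRunB, lcTableB, hda, smk_dash]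
      · simp [lcRunB, lcTableB, hsp, hda]

theorem line_classifier_eq_alt (line : String) :
    line_classifier line = line_classifier_alt line := by
  unfold line_classifier line_classifier_alt
  cases hcs : line.toList with
  | nil => rw [lcLoopA]; simp [lcRunB]
  | cons c rest =>
    by_cases hrepo : c ≠ ' ' ∧ c ≠ '-'
    · rw [lcLoopA]
      simp [lcRunB, lcTableB, hrepo.1, hrepo.2]
    · have hstart : lcRunB "start" (c :: rest) = lcRunB "skip" rest := by
        by_cases hsp : c = ' '
        · simp [lcRunB, lcTableB, hsp, smk_space]
        · have hda : c = '-' := by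
            by_contra hda; exact hrepo ⟨hsp, hda⟩
          simp [lcRunB, lcTableB, hda, smk_dash]
      rw [hstart, lcRunB_skip]
      have hA : lcLoopA (c :: rest) 0 = lcLoopA (c :: rest) 1 := by
        rw [lcLoopA]; simp [hrepo]
      rw [hA, lcLoopA_tail (c :: rest) 1 le_rfl]
      simp only [List.drop_succ_cons, List.drop_zero]
      cases hdw : rest.dropWhile (· = ' ') with
      | nil => simp
      | cons d tl => by_cases hd : d = '-' <;> simp [hd]

-- ===== VERDICT (by name: the statement is the Claim_ definition above) =====
theorem line_classifier_spec : Claim_equal_line_classifier := by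
  intro line _
  unfold Spec_line_classifier
  exact line_classifier_eq_alt line
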